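-- pv_equiv track=rewrite | github.com/Jonnyton/Workflow | domains/fantasy_daemon/phases/diagnose.py | _count_recent_reverts
-- ===== SOURCE A (Python) =====
-- from typing import Any
--
-- def _count_recent_reverts(quality_trace: list[dict[str, Any]]) -> int:
--     """Count consecutive reverts at the tail of the quality trace.
--
--     Only looks at commit-node entries with a verdict of 'revert'.
--     """
--     count = 0
--     for entry in reversed(quality_trace):
--         if entry.get("node") != "commit":
--             continue
--         if entry.get("verdict") == "revert":
--             count += 1
--         else:
--             break
--     return count
-- ===== SOURCE B (Python) =====
-- from typing import Any
-- from itertools import takewhile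
--
-- def _count_recent_reverts(quality_trace: list[dict[str, Any]]) -> int:
--     """Count consecutive reverts at the tail of the quality trace."""
--     commits = [e for e in quality_trace if e.get("node") == "commit"]
--     return sum(1 for _ in takewhile(lambda e: e.get("verdict") == "revert",
--                                     reversed(commits)))
-- ===== Notes on version B (the rewrite author's own statement) =====
-- stated objective: alternative
-- what changed: Replaces the single interleaved skip/count/break loop over the reversed trace with two separated passes: a filtering pass that keeps only commit-node entries, then a terminal-run scan (takewhile over the reversed filtered list) counting the trailing reverts.
import Mathlib
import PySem

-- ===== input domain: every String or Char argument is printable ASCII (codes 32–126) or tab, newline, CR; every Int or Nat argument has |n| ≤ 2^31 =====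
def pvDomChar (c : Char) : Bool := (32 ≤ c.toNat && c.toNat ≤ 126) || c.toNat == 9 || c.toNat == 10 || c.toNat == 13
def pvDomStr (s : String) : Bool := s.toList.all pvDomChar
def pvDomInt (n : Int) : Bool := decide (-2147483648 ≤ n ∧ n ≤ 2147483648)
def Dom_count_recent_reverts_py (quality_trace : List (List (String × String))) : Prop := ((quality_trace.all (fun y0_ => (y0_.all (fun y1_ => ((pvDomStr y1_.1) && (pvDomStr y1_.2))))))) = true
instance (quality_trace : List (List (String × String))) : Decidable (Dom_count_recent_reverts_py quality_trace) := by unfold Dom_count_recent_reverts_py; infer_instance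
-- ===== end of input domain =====

-- B separates A's interleaved skip/count/break loop into a filter pass plus a trailing-run scan; same cost (alternative decomposition).

-- ===== PORT A =====
-- the for-loop over reversed(quality_trace) with its break, as structural recursion over the reversed list
def pvALoop : List (List (String × String)) → Int
  | [] => 0
  | e :: rest =>
    if e.lookup "node" ≠ some "commit" then pvALoop rest            -- continue
    else if e.lookup "verdict" = some "revert" then pvALoop rest + 1  -- count += 1
    else 0                                                            -- break

def count_recent_reverts_py (quality_trace : List (List (String × String))) : Int :=
  pvALoop quality_trace.reverse

-- ===== PORT B =====
def count_recent_reverts_py_alt (quality_trace : List (List (String × String))) : Int :=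
  let commits := quality_trace.filter (fun e => e.lookup "node" == some "commit")
  (Int.ofNat ((commits.reverse.takeWhile (fun e => e.lookup "verdict" == some "revert")).length))

-- ===== PRECONDITION & SPEC =====
def Spec_count_recent_reverts_py (quality_trace : List (List (String × String))) (out : Int) : Prop := out = count_recent_reverts_py_alt quality_trace
instance (quality_trace : List (List (String × String))) (out : Int) : Decidable (Spec_count_recent_reverts_py quality_trace out) := by unfold Spec_count_recent_reverts_py; infer_instance

-- ===== CLAIM (what is proved, stated in full; the proofs are below) =====
def Claim_equal_count_recent_reverts_py : Prop := ∀ (quality_trace : List (List (String × String))), Dom_count_recent_reverts_py quality_trace → Spec_count_recent_reverts_py quality_trace (count_recent_reverts_py quality_trace)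

-- ===== LEMMAS AND PROOFS =====
theorem pvALoop_eq (l : List (List (String × String))) :
    pvALoop l =
      Int.ofNat (((l.filter (fun e => e.lookup "node" == some "commit")).takeWhile
        (fun e => e.lookup "verdict" == some "revert")).length) := by
  induction l with
  | nil => rfl
  | cons e rest ih =>
    by_cases hn : e.lookup "node" = some "commit"
    · by_cases hv : e.lookup "verdict" = some "revert"
      · simp [pvALoop, hn, hv, ih]
      · simp [pvALoop, hn, hv]
    · simp [pvALoop, hn, ih]

-- ===== VERDICT (by name: the statement is the Claim_ definition above) =====
theorem count_recent_reverts_py_spec : Claim_equal_count_recent_reverts_py := by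
  intro qt _
  show count_recent_reverts_py qt = count_recent_reverts_py_alt qt
  simp [count_recent_reverts_py, count_recent_reverts_py_alt, pvALoop_eq, List.filter_reverse]
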